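-- pv_equiv track=rewrite | github.com/zhiquan-w/practice | python/get_overlap_from.py | _get_st_end
-- ===== SOURCE A (Python) =====
-- def _get_st_end(t_chunk, ocm_chunks):
--     offset = t_chunk[0]
--     t_st = 0
--     t_end = 0
--     for st, size in ocm_chunks:
--         offset -= size
--         if offset <= 0:
--             t_st = st + size - abs(offset)
--             break
--     offset_end = sum(t_chunk)
--     for st, size in ocm_chunks:
--         offset_end -= size
--         if offset_end <= 0:
--             t_end = st + size - abs(offset_end)
--             break
--     return (t_st, t_end)
--
-- t_chunk = (10, 200)
-- ===== SOURCE B (Python) =====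
-- def _get_st_end(t_chunk, ocm_chunks):
--     # one pass over ocm_chunks with a running prefix sum, answering both
--     # offset queries at once (A scans the chunk list twice)
--     q_st = t_chunk[0]
--     q_end = sum(t_chunk)
--     t_st = t_end = 0
--     found_st = found_end = False
--     s = 0
--     for st, size in ocm_chunks:
--         s += size
--         if not found_st and s >= q_st:
--             t_st = st + size + q_st - s
--             found_st = True
--         if not found_end and s >= q_end:
--             t_end = st + size + q_end - s
--             found_end = True
--         if found_st and found_end:
--             break
--     return (t_st, t_end)
-- ===== Notes on version B (the rewrite author's own statement) =====
-- stated objective: alternative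
-- what changed: A scans ocm_chunks twice, mutating a separate countdown offset per query; B makes a single pass maintaining one running prefix sum and answers both offset queries in that pass, breaking once both are found.
import Mathlib
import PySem

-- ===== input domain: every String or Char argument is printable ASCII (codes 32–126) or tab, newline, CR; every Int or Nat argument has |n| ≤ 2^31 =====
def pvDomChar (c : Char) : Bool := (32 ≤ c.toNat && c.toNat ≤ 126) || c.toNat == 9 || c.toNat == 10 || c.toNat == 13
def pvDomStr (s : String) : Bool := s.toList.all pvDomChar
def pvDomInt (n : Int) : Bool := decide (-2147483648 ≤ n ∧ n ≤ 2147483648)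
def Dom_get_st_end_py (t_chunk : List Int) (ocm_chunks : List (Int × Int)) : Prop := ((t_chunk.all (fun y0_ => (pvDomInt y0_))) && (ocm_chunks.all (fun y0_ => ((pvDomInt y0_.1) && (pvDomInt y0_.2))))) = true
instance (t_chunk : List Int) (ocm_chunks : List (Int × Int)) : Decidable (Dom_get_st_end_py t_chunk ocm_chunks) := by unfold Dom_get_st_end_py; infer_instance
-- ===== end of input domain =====

-- B replaces A's two separate countdown scans over ocm_chunks by a single pass
-- with one running prefix sum answering both offset queries (objective: alternative).


-- ===== PORT A =====
-- One of A's loops: countdown `offset`, break with st+size-|offset| at the first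
-- chunk where it drops to ≤ 0; 0 (the initial t_st/t_end) if it never does.
def pvALoop (offset : Int) (cs : List (Int × Int)) : Int :=
  match cs with
  | [] => 0
  | (st, size) :: rest =>
    let offset' := offset - size
    if offset' ≤ 0 then st + size - |offset'| else pvALoop offset' rest

def get_st_end_py (t_chunk : List Int) (ocm_chunks : List (Int × Int)) : Int × Int :=
  let offset := (PySem.List.pyGet? t_chunk 0).getD 0   -- t_chunk[0]; none only outside Pre_
  let t_st := pvALoop offset ocm_chunks
  let offset_end := t_chunk.sum
  let t_end := pvALoop offset_end ocm_chunks
  (t_st, t_end)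

-- ===== PORT B =====
-- B's single loop: running prefix sum s, both answers carried with found-flags.
def pvBLoop (q_st q_end s t_st t_end : Int) (f_st f_end : Bool) (cs : List (Int × Int)) : Int × Int :=
  match cs with
  | [] => (t_st, t_end)
  | (st, size) :: rest =>
    let s' := s + size
    let p := if !f_st && s' ≥ q_st then (st + size + q_st - s', true) else (t_st, f_st)
    let q := if !f_end && s' ≥ q_end then (st + size + q_end - s', true) else (t_end, f_end)
    if p.2 && q.2 then (p.1, q.1)
    else pvBLoop q_st q_end s' p.1 q.1 p.2 q.2 rest

def get_st_end_py_alt (t_chunk : List Int) (ocm_chunks : List (Int × Int)) : Int × Int :=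
  let q_st := (PySem.List.pyGet? t_chunk 0).getD 0   -- t_chunk[0]; none only outside Pre_
  let q_end := t_chunk.sum
  pvBLoop q_st q_end 0 0 0 false false ocm_chunks

-- ===== PRECONDITION & SPEC =====
-- Pre_ excludes only the empty t_chunk, on which A raises IndexError at t_chunk[0] (B does too).
def Pre_get_st_end_py (t_chunk : List Int) (ocm_chunks : List (Int × Int)) : Prop := t_chunk ≠ []
instance (t_chunk : List Int) (ocm_chunks : List (Int × Int)) : Decidable (Pre_get_st_end_py t_chunk ocm_chunks) := by unfold Pre_get_st_end_py; infer_instance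
def pvWitness_get_st_end_py : List Int × (List (Int × Int)) := ([10, 200], [(0, 100), (500, 300)])

def Spec_get_st_end_py (t_chunk : List Int) (ocm_chunks : List (Int × Int)) (out : Int × Int) : Prop := out = get_st_end_py_alt t_chunk ocm_chunks
instance (t_chunk : List Int) (ocm_chunks : List (Int × Int)) (out : Int × Int) : Decidable (Spec_get_st_end_py t_chunk ocm_chunks out) := by unfold Spec_get_st_end_py; infer_instance

-- ===== CLAIM (what is proved, stated in full; the proofs are below) =====
def Claim_equal_get_st_end_py : Prop := ∀ (t_chunk : List Int) (ocm_chunks : List (Int × Int)), Dom_get_st_end_py t_chunk ocm_chunks → Pre_get_st_end_py t_chunk ocm_chunks → Spec_get_st_end_py t_chunk ocm_chunks (get_st_end_py t_chunk ocm_chunks)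

-- ===== LEMMAS AND PROOFS =====

-- A-side loop after one step, expressed against the prefix sum s.
lemma pvALoop_cons (q s st size : Int) (tl : List (Int × Int)) :
    pvALoop (q - s) ((st, size) :: tl) =
      if s + size ≥ q then st + size + q - (s + size) else pvALoop (q - (s + size)) tl := by
  simp only [pvALoop]
  split_ifs with h1 h2 h2
  · rw [abs_of_nonpos (by omega : q - s - size ≤ 0)]; ring
  · omega
  · omega
  · congr 1; ring

lemma pvBLoop_eq (cs : List (Int × Int)) : ∀ (q_st q_end s t_st t_end : Int) (f_st f_end : Bool),
    (f_st = false → t_st = 0) → (f_end = false → t_end = 0) →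
    pvBLoop q_st q_end s t_st t_end f_st f_end cs =
      ((if f_st then t_st else pvALoop (q_st - s) cs),
       (if f_end then t_end else pvALoop (q_end - s) cs)) := by
  induction cs with
  | nil =>
    intro q_st q_end s t_st t_end f_st f_end h1 h2
    cases f_st <;> cases f_end <;> simp_all [pvBLoop, pvALoop]
  | cons hd tl ih =>
    intro q_st q_end s t_st t_end f_st f_end h1 h2
    obtain ⟨st, size⟩ := hd
    rw [show pvBLoop q_st q_end s t_st t_end f_st f_end ((st, size) :: tl) =
      (let s' := s + size
       let p := if !f_st && s' ≥ q_st then (st + size + q_st - s', true) else (t_st, f_st)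
       let q := if !f_end && s' ≥ q_end then (st + size + q_end - s', true) else (t_end, f_end)
       if p.2 && q.2 then (p.1, q.1)
       else pvBLoop q_st q_end s' p.1 q.1 p.2 q.2 tl) from rfl]
    cases f_st <;> cases f_end <;>
      by_cases hc1 : s + size ≥ q_st <;> by_cases hc2 : s + size ≥ q_end <;>
      simp only [Bool.not_false, Bool.not_true, Bool.true_and, Bool.false_and,
        hc1, hc2, if_true, if_false, ite_true, ite_false, Bool.and_true, Bool.and_false,
        Bool.and_self, pvALoop_cons] <;>
      (try rw [ih _ _ (s + size) _ _ _ _ (by simp_all) (by simp_all)]) <;>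
      simp_all [pvALoop_cons]

-- ===== VERDICT (by name: the statement is the Claim_ definition above) =====
theorem get_st_end_py_spec : Claim_equal_get_st_end_py := by
  intro t_chunk ocm_chunks _ _
  unfold Spec_get_st_end_py get_st_end_py get_st_end_py_alt
  rw [pvBLoop_eq ocm_chunks _ _ 0 0 0 false false (fun _ => rfl) (fun _ => rfl)]
  simp
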